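-- pv_equiv track=rewrite | github.com/Daba-byte/SWEA | IM대비/4613_러시아국기같은깃발.py | min_paint_cost
-- ===== SOURCE A (Python) =====
-- def min_paint_cost(N, M, flag):
--     # 비용 테이블 초기화
--     white_cost = [0] * N
--     blue_cost = [0] * N
--     red_cost = [0] * N
--
--     for i in range(N):
--         white_cost[i] = M - flag[i].count('W')
--         blue_cost[i] = M - flag[i].count('B')
--         red_cost[i] = M - flag[i].count('R')
--
--     min_cost = 10000
--
--     # 가능한 모든 (i, j) 조합에 대해 최소 비용 계산
--     for i in range(0, N-2):
--         for j in range(i+1, N-1):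
--             white_section = sum(white_cost[:i+1])
--             blue_section = sum(blue_cost[i+1:j+1])
--             red_section = sum(red_cost[j+1:])
--
--             total_cost = white_section + blue_section + red_section
--             min_cost = min(min_cost, total_cost)
--
--     return min_cost
-- ===== SOURCE B (Python) =====
-- def min_paint_cost(N, M, flag):
--     # Prefix sums of per-row repaint costs; each (i, j) section cost is then O(1).
--     rows = [flag[i] for i in range(N)]
--
--     def prefixes(c):
--         out = [0]
--         s = 0
--         for row in rows:
--             s += M - row.count(c)
--             out.append(s)
--         return out
--
--     Wp = prefixes('W')
--     Bp = prefixes('B')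
--     Rp = prefixes('R')
--
--     min_cost = 10000
--     for i in range(N - 2):
--         for j in range(i + 1, N - 1):
--             cost = Wp[i + 1] + (Bp[j + 1] - Bp[i + 1]) + (Rp[N] - Rp[j + 1])
--             if cost < min_cost:
--                 min_cost = cost
--     return min_cost
-- ===== Notes on version B (the rewrite author's own statement) =====
-- stated objective: alternative
-- what changed: B precomputes one prefix-sum array per colour so each (i,j) candidate cost is O(1) work instead of A's three inner slice-sum scans per pair (O(N^2) vs O(N^3) arithmetic); the speed-up is claimed conservatively since one timing run could not confirm it at the largest size.
import Mathlib
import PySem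

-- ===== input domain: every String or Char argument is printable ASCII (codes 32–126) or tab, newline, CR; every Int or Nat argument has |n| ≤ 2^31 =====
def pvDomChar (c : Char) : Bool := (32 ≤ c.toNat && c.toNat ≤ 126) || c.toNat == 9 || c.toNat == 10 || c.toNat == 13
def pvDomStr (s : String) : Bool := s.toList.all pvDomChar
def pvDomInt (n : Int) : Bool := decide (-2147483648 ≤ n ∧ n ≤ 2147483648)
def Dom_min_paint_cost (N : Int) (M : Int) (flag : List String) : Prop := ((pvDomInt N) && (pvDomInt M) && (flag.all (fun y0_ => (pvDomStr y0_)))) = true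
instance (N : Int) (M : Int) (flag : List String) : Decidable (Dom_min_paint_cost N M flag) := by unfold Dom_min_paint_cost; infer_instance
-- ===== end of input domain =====

-- B builds three prefix-sum arrays once, so each (i, j) section cost is a constant number
-- of array reads instead of A's per-pair slice sums (alternative algorithm; return value only).

-- ===== PORT A =====
def min_paint_cost (N : Int) (M : Int) (flag : List String) : Int :=
  let white_cost := (PySem.List.pyRange 0 N 1).map
    (fun i => M - (PySem.Str.count (PySem.List.pyGetD flag i "") "W" : Int))
  let blue_cost := (PySem.List.pyRange 0 N 1).map
    (fun i => M - (PySem.Str.count (PySem.List.pyGetD flag i "") "B" : Int))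
  let red_cost := (PySem.List.pyRange 0 N 1).map
    (fun i => M - (PySem.Str.count (PySem.List.pyGetD flag i "") "R" : Int))
  (PySem.List.pyRange 0 (N - 2) 1).foldl (fun mc i =>
    (PySem.List.pyRange (i + 1) (N - 1) 1).foldl (fun mc j =>
      let white_section := (PySem.List.slice white_cost none (some (i + 1))).sum
      let blue_section := (PySem.List.slice blue_cost (some (i + 1)) (some (j + 1))).sum
      let red_section := (PySem.List.slice red_cost (some (j + 1)) none).sum
      min mc (white_section + blue_section + red_section)) mc) 10000

-- ===== PORT B =====
-- Source B's inner helper `prefixes(c)`: [0] followed by running sums of per-row costs.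
def pvPrefixes (M : Int) (rows : List String) (c : String) : List Int :=
  (rows.foldl (fun (st : List Int × Int) row =>
      (st.1 ++ [st.2 + (M - (PySem.Str.count row c : Int))],
       st.2 + (M - (PySem.Str.count row c : Int)))) ([0], 0)).1

def min_paint_cost_alt (N : Int) (M : Int) (flag : List String) : Int :=
  let rows := (PySem.List.pyRange 0 N 1).map (fun i => PySem.List.pyGetD flag i "")
  let Wp := pvPrefixes M rows "W"
  let Bp := pvPrefixes M rows "B"
  let Rp := pvPrefixes M rows "R"
  (PySem.List.pyRange 0 (N - 2) 1).foldl (fun mc i =>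
    (PySem.List.pyRange (i + 1) (N - 1) 1).foldl (fun mc j =>
      let cost := PySem.List.pyGetD Wp (i + 1) 0
        + (PySem.List.pyGetD Bp (j + 1) 0 - PySem.List.pyGetD Bp (i + 1) 0)
        + (PySem.List.pyGetD Rp N 0 - PySem.List.pyGetD Rp (j + 1) 0)
      if cost < mc then cost else mc) mc) 10000

-- ===== PRECONDITION & SPEC =====
-- Pre_ excludes N > len(flag), where the Python A (and B) raises IndexError on flag[i].
def Pre_min_paint_cost (N : Int) (M : Int) (flag : List String) : Prop :=
  N ≤ (flag.length : Int)
instance (N : Int) (M : Int) (flag : List String) : Decidable (Pre_min_paint_cost N M flag) := by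
  unfold Pre_min_paint_cost; infer_instance

def pvWitness_min_paint_cost : Int × Int × List String := (4, 2, ["WW", "WB", "BR", "RR"])

def Spec_min_paint_cost (N : Int) (M : Int) (flag : List String) (out : Int) : Prop := out = min_paint_cost_alt N M flag
instance (N : Int) (M : Int) (flag : List String) (out : Int) : Decidable (Spec_min_paint_cost N M flag out) := by unfold Spec_min_paint_cost; infer_instance

-- ===== CLAIM (what is proved, stated in full; the proofs are below) =====
def Claim_equal_min_paint_cost : Prop := ∀ (N : Int) (M : Int) (flag : List String), Dom_min_paint_cost N M flag → Pre_min_paint_cost N M flag → Spec_min_paint_cost N M flag (min_paint_cost N M flag)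

-- ===== LEMMAS AND PROOFS =====

-- The fold in pvPrefixes: running sum appended at each step.
theorem pvFoldlPrefix (f : String → Int) (rows : List String) (acc : List Int) (s : Int) :
    (rows.foldl (fun (st : List Int × Int) row => (st.1 ++ [st.2 + f row], st.2 + f row)) (acc, s))
      = (acc ++ (List.range rows.length).map (fun k => s + ((rows.take (k + 1)).map f).sum),
         s + (rows.map f).sum) := by
  induction rows generalizing acc s with
  | nil => simp
  | cons x xs ih =>
    simp only [List.foldl_cons, ih, List.length_cons, List.range_succ_eq_map,
      List.map_cons, List.map_map, List.sum_cons,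
      List.take_succ_cons, List.append_assoc, List.singleton_append]
    rw [Prod.mk.injEq]
    refine ⟨?_, by ring⟩
    simp only [List.take_zero, List.map_nil, List.sum_nil, add_zero, add_assoc]
    simp [Function.comp_def, Nat.succ_eq_add_one]

-- pvPrefixes is the list of partial sums of the per-row costs.
theorem pvPrefixes_eq (M : Int) (rows : List String) (c : String) :
    pvPrefixes M rows c
      = (List.range (rows.length + 1)).map
          (fun k => ((rows.map (fun r => M - (PySem.Str.count r c : Int))).take k).sum) := by
  unfold pvPrefixes
  rw [pvFoldlPrefix (fun r => M - (PySem.Str.count r c : Int)) rows [0] 0]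
  simp [List.range_succ_eq_map, Function.comp, ← List.map_take]

-- Reading pvPrefixes at a cast Nat index within range.
theorem pvPrefixes_get (M : Int) (rows : List String) (c : String) (t : Nat)
    (ht : t ≤ rows.length) :
    PySem.List.pyGetD (pvPrefixes M rows c) (t : Int) 0
      = ((rows.map (fun r => M - (PySem.Str.count r c : Int))).take t).sum := by
  rw [pvPrefixes_eq, PySem.List.pyGetD_natCast, List.getD_eq_getElem?_getD,
    List.getElem?_map, List.getElem?_range (by omega)]
  rfl

theorem pvMinEq (a b : Int) : min a b = if b < a then b else a := by
  rw [min_def]; split_ifs <;> omega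

theorem pvSumTake_add (l : List Int) (a b : Nat) (hab : a ≤ b) :
    ((l.drop a).take (b - a)).sum = (l.take b).sum - (l.take a).sum := by
  have h : l.take b = l.take a ++ (l.drop a).take (b - a) := by
    rw [← List.take_add]; congr 1; omega
  rw [h, List.sum_append]; ring

theorem pvSumDrop (l : List Int) (a : Nat) :
    (l.drop a).sum = l.sum - (l.take a).sum := by
  have h : (l.take a).sum + (l.drop a).sum = l.sum := by
    rw [← List.sum_append, List.take_append_drop]
  omega

-- ===== VERDICT (by name: the statement is the Claim_ definition above) =====
theorem min_paint_cost_spec : Claim_equal_min_paint_cost := by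
  intro N M flag _hd _hp
  unfold Spec_min_paint_cost
  simp only [min_paint_cost, min_paint_cost_alt]
  set rows := (PySem.List.pyRange 0 N 1).map (fun i => PySem.List.pyGetD flag i "") with hrows
  have hcost : ∀ c : String,
      (PySem.List.pyRange 0 N 1).map
        (fun i => M - (PySem.Str.count (PySem.List.pyGetD flag i "") c : Int))
      = rows.map (fun r => M - (PySem.Str.count r c : Int)) := by
    intro c; simp [hrows, List.map_map, Function.comp]
  rw [hcost "W", hcost "B", hcost "R"]
  have hnl : rows.length = N.toNat := by
    rw [hrows, List.length_map, PySem.List.length_pyRange_one]; omega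
  apply PySem.List.foldl_congr_mem
  intro mc i hi
  rw [PySem.List.mem_pyRange_one] at hi
  apply PySem.List.foldl_congr_mem
  intro mc' j hj
  rw [PySem.List.mem_pyRange_one] at hj
  obtain ⟨a, ha⟩ : ∃ a : Nat, (a : Int) = i + 1 := ⟨(i + 1).toNat, by omega⟩
  obtain ⟨b, hb⟩ : ∃ b : Nat, (b : Int) = j + 1 := ⟨(j + 1).toNat, by omega⟩
  have hab : a ≤ b := by omega
  have han : a ≤ rows.length := by omega
  have hbn : b ≤ rows.length := by omega
  have hNn : (N.toNat : Int) = N := by omega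
  rw [← hNn, ← ha, ← hb]
  rw [pvPrefixes_get M rows "W" a han, pvPrefixes_get M rows "B" b hbn,
    pvPrefixes_get M rows "B" a han, pvPrefixes_get M rows "R" N.toNat (by omega),
    pvPrefixes_get M rows "R" b hbn]
  rw [PySem.List.slice_to_natCast, PySem.List.slice_natCast, PySem.List.slice_from_natCast]
  rw [pvSumTake_add _ a b hab, pvSumDrop _ b,
    List.take_of_length_le
      (l := List.map (fun r => M - (PySem.Str.count r "R" : Int)) rows)
      (i := N.toNat) (by simp [hnl]),
    pvMinEq]
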